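-- pv_equiv track=rewrite | github.com/YusungAN/algorithm-study | 백준/Silver/24495. Non－Transitive Dice/Non－Transitive Dice.py | is_win_first
-- ===== SOURCE A (Python) =====
-- def is_win_first(a, b):
--     a_cnt = 0
--     b_cnt = 0
--     for i in a:
--         for j in b:
--             if i > j:
--                 a_cnt += 1
--             elif j > i:
--                 b_cnt += 1
--
--     return a_cnt > b_cnt
-- ===== SOURCE B (Python) =====
-- def _bisect_left(sb, x):
--     lo, hi = 0, len(sb)
--     while lo < hi:
--         mid = (lo + hi) // 2
--         if sb[mid] < x:
--             lo = mid + 1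
--         else:
--             hi = mid
--     return lo
--
--
-- def _bisect_right(sb, x):
--     lo, hi = 0, len(sb)
--     while lo < hi:
--         mid = (lo + hi) // 2
--         if sb[mid] <= x:
--             lo = mid + 1
--         else:
--             hi = mid
--     return lo
--
--
-- def is_win_first(a, b):
--     sb = sorted(b)
--     m = len(sb)
--     diff = 0
--     for x in a:
--         diff += _bisect_left(sb, x) - (m - _bisect_right(sb, x))
--     return diff > 0
-- ===== Notes on version B (the rewrite author's own statement) =====
-- stated objective: faster
-- what changed: Sort b once and, for each face of a, count smaller/greater faces of b by binary search on the sorted copy, accumulating the signed difference of the two pair counts instead of scanning b for every face.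
import Mathlib
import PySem

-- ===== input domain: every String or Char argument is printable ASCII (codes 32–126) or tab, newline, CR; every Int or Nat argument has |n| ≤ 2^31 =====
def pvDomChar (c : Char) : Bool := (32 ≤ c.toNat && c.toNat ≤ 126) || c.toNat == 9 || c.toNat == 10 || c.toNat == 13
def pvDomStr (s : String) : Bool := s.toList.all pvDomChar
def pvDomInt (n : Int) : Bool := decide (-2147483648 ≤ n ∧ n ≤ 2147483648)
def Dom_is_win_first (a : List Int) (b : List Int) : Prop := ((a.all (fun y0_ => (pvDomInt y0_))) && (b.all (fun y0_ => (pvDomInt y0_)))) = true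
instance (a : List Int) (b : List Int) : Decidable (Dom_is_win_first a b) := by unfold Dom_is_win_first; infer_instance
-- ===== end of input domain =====

-- B sorts b once and counts smaller/greater faces by binary search per face of a (O((n+m) log m) instead of A's O(n*m) nested scan).

-- ===== PORT A =====
-- literal port of A's nested loop over counters (a_cnt, b_cnt)
def is_win_first (a : List Int) (b : List Int) : Bool :=
  let s := a.foldl (fun (s : Int × Int) i =>
    b.foldl (fun (t : Int × Int) j =>
      if i > j then (t.1 + 1, t.2)
      else if j > i then (t.1, t.2 + 1)
      else t) s) (0, 0)
  decide (s.1 > s.2)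

-- ===== PORT B =====
-- hand-written binary searches from Source B: while lo < hi loop, ported as recursion on hi - lo.
-- sb[mid] is ported as getD (mid is always in range at runtime, since lo < hi ≤ len sb); (lo+hi)//2 on
-- nonnegative ints is Nat division, exact here.
-- fuel bounds the loop iterations only (hi - lo shrinks each turn; fuel = len + 1 is always enough)
def pvBL (sb : List Int) (x : Int) : Nat → Nat → Nat → Nat
  | 0, lo, _ => lo
  | fuel + 1, lo, hi =>
    if lo < hi then
      let mid := (lo + hi) / 2
      if sb.getD mid 0 < x then pvBL sb x fuel (mid + 1) hi else pvBL sb x fuel lo mid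
    else lo

def pvBR (sb : List Int) (x : Int) : Nat → Nat → Nat → Nat
  | 0, lo, _ => lo
  | fuel + 1, lo, hi =>
    if lo < hi then
      let mid := (lo + hi) / 2
      if sb.getD mid 0 ≤ x then pvBR sb x fuel (mid + 1) hi else pvBR sb x fuel lo mid
    else lo

def is_win_first_alt (a : List Int) (b : List Int) : Bool :=
  let sb := PySem.List.sorted b (fun x => x) false
  let m := sb.length
  let diff := a.foldl (fun (d : Int) x =>
    d + ((pvBL sb x (m + 1) 0 m : Int) - ((m : Int) - (pvBR sb x (m + 1) 0 m : Int)))) 0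
  decide (diff > 0)

-- ===== PRECONDITION & SPEC =====
def Spec_is_win_first (a : List Int) (b : List Int) (out : Bool) : Prop := out = is_win_first_alt a b
instance (a : List Int) (b : List Int) (out : Bool) : Decidable (Spec_is_win_first a b out) := by unfold Spec_is_win_first; infer_instance

-- ===== CLAIM (what is proved, stated in full; the proofs are below) =====
def Claim_equal_is_win_first : Prop := ∀ (a : List Int) (b : List Int), Dom_is_win_first a b → Spec_is_win_first a b (is_win_first a b)

-- ===== LEMMAS AND PROOFS =====

-- a list whose first k elements satisfy p and whose remaining elements do not has countP p = k
lemma countP_split (xs : List Int) (p : Int → Bool) (k : Nat) (hk : k ≤ xs.length)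
    (h1 : ∀ j (hj : j < xs.length), j < k → p xs[j])
    (h2 : ∀ j (hj : j < xs.length), k ≤ j → ¬ p xs[j]) :
    xs.countP p = k := by
  induction xs generalizing k with
  | nil => simp at hk; simp [hk]
  | cons y t ih =>
    cases k with
    | zero =>
      have : ∀ z ∈ (y :: t), ¬ p z := by
        intro z hz
        obtain ⟨j, hj, rfl⟩ := List.mem_iff_getElem.mp hz
        exact h2 j hj (Nat.zero_le _)
      simpa using List.countP_eq_zero.mpr this
    | succ k' =>
      have hy : p y := h1 0 (by simp) (by omega)
      have : t.countP p = k' := by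
        apply ih
        · simpa using hk
        · intro j hj hjk
          have := h1 (j + 1) (by simpa using hj) (by omega)
          simpa using this
        · intro j hj hjk
          have := h2 (j + 1) (by simpa using hj) (by omega)
          simpa using this
      simp [hy, this]

-- the binary search pvBL returns the count of elements < x in a sorted list (fuel ≥ hi - lo)
lemma pvBL_spec (sb : List Int) (x : Int) (hs : sb.Pairwise (· ≤ ·)) (fuel lo hi : Nat)
    (hf : hi - lo ≤ fuel) (hhi : hi ≤ sb.length) (hlh : lo ≤ hi)
    (hlo : ∀ j (hj : j < sb.length), j < lo → sb[j] < x)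
    (hhi2 : ∀ j (hj : j < sb.length), hi ≤ j → x ≤ sb[j]) :
    pvBL sb x fuel lo hi = sb.countP (fun y => decide (y < x)) := by
  induction fuel generalizing lo hi with
  | zero =>
    have : lo = hi := by omega
    subst this
    exact (countP_split sb _ lo (by omega)
      (fun j hj hjk => by simpa using hlo j hj hjk)
      (fun j hj hjk => by simpa using hhi2 j hj (by omega))).symm
  | succ fuel ih =>
    rw [pvBL]
    by_cases h : lo < hi
    · rw [if_pos h]
      have hmid : (lo + hi) / 2 < sb.length := by omega
      have hget : sb.getD ((lo + hi) / 2) 0 = sb[(lo + hi) / 2] := List.getD_eq_getElem sb 0 hmid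
      by_cases hc : sb.getD ((lo + hi) / 2) 0 < x
      · rw [if_pos hc]
        apply ih _ _ (by omega) (by omega) (by omega)
        · intro j hj hjk
          rcases Nat.lt_or_ge j lo with hd | hd
          · exact hlo j hj hd
          · have hle : sb[j] ≤ sb[(lo + hi) / 2] := by
              rcases Nat.eq_or_lt_of_le (show j ≤ (lo + hi) / 2 by omega) with heq | hlt
              · subst heq; exact le_refl _
              · exact (List.pairwise_iff_getElem.mp hs) j _ hj hmid hlt
            rw [hget] at hc; omega
        · exact hhi2
      · rw [if_neg hc]
        apply ih _ _ (by omega) (by omega) (by omega)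
        · exact hlo
        · intro j hj hjk
          have hx : x ≤ sb[(lo + hi) / 2] := by rw [hget] at hc; omega
          rcases Nat.lt_or_ge j hi with hd | hd
          · have hmj : sb[(lo + hi) / 2] ≤ sb[j] := by
              rcases Nat.eq_or_lt_of_le (show (lo + hi) / 2 ≤ j by omega) with heq | hlt
              · subst heq; exact le_refl _
              · exact (List.pairwise_iff_getElem.mp hs) _ j hmid hj hlt
            omega
          · exact hhi2 j hj hd
    · rw [if_neg h]
      have : lo = hi := by omega
      subst this
      exact (countP_split sb _ lo (by omega)
        (fun j hj hjk => by simpa using hlo j hj hjk)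
        (fun j hj hjk => by simpa using hhi2 j hj (by omega))).symm

-- pvBR returns the count of elements ≤ x in a sorted list (fuel ≥ hi - lo)
lemma pvBR_spec (sb : List Int) (x : Int) (hs : sb.Pairwise (· ≤ ·)) (fuel lo hi : Nat)
    (hf : hi - lo ≤ fuel) (hhi : hi ≤ sb.length) (hlh : lo ≤ hi)
    (hlo : ∀ j (hj : j < sb.length), j < lo → sb[j] ≤ x)
    (hhi2 : ∀ j (hj : j < sb.length), hi ≤ j → x < sb[j]) :
    pvBR sb x fuel lo hi = sb.countP (fun y => decide (y ≤ x)) := by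
  induction fuel generalizing lo hi with
  | zero =>
    have : lo = hi := by omega
    subst this
    exact (countP_split sb _ lo (by omega)
      (fun j hj hjk => by simpa using hlo j hj hjk)
      (fun j hj hjk => by simpa using not_le.mpr (hhi2 j hj (by omega)))).symm
  | succ fuel ih =>
    rw [pvBR]
    by_cases h : lo < hi
    · rw [if_pos h]
      have hmid : (lo + hi) / 2 < sb.length := by omega
      have hget : sb.getD ((lo + hi) / 2) 0 = sb[(lo + hi) / 2] := List.getD_eq_getElem sb 0 hmid
      by_cases hc : sb.getD ((lo + hi) / 2) 0 ≤ x
      · rw [if_pos hc]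
        apply ih _ _ (by omega) (by omega) (by omega)
        · intro j hj hjk
          rcases Nat.lt_or_ge j lo with hd | hd
          · exact hlo j hj hd
          · have hle : sb[j] ≤ sb[(lo + hi) / 2] := by
              rcases Nat.eq_or_lt_of_le (show j ≤ (lo + hi) / 2 by omega) with heq | hlt
              · subst heq; exact le_refl _
              · exact (List.pairwise_iff_getElem.mp hs) j _ hj hmid hlt
            rw [hget] at hc; omega
        · exact hhi2
      · rw [if_neg hc]
        apply ih _ _ (by omega) (by omega) (by omega)
        · exact hlo
        · intro j hj hjk
          have hx : x < sb[(lo + hi) / 2] := by rw [hget] at hc; omega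
          rcases Nat.lt_or_ge j hi with hd | hd
          · have hmj : sb[(lo + hi) / 2] ≤ sb[j] := by
              rcases Nat.eq_or_lt_of_le (show (lo + hi) / 2 ≤ j by omega) with heq | hlt
              · subst heq; exact le_refl _
              · exact (List.pairwise_iff_getElem.mp hs) _ j hmid hj hlt
            omega
          · exact hhi2 j hj hd
    · rw [if_neg h]
      have : lo = hi := by omega
      subst this
      exact (countP_split sb _ lo (by omega)
        (fun j hj hjk => by simpa using hlo j hj hjk)
        (fun j hj hjk => by simpa using not_le.mpr (hhi2 j hj (by omega)))).symm

-- A's inner loop over b adds to the counters the numbers of faces of b below / above i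
lemma inner_fold (b : List Int) (i : Int) (s : Int × Int) :
    b.foldl (fun (t : Int × Int) j =>
      if i > j then (t.1 + 1, t.2)
      else if j > i then (t.1, t.2 + 1)
      else t) s
    = (s.1 + (b.countP (fun j => decide (j < i)) : Int),
       s.2 + (b.countP (fun j => decide (i < j)) : Int)) := by
  induction b generalizing s with
  | nil => simp
  | cons j t ih =>
    simp only [List.foldl_cons, List.countP_cons]
    by_cases h1 : i > j
    · rw [if_pos h1, ih]
      have h2 : ¬ (j > i) := by omega
      simp [h1, h2]
      omega
    · rw [if_neg h1]
      by_cases h2 : j > i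
      · rw [if_pos h2, ih]
        simp [show ¬ (j < i) by omega, h2]
        omega
      · rw [ih]
        simp [show ¬ (j < i) by omega, show ¬ (i < j) by omega]

-- A's outer loop accumulates the total pair counts
lemma a_fold (a b : List Int) (s : Int × Int) :
    a.foldl (fun (s : Int × Int) i =>
      b.foldl (fun (t : Int × Int) j =>
        if i > j then (t.1 + 1, t.2)
        else if j > i then (t.1, t.2 + 1)
        else t) s) s
    = (s.1 + ((a.map (fun i => (b.countP (fun j => decide (j < i)) : Int))).sum),
       s.2 + ((a.map (fun i => (b.countP (fun j => decide (i < j)) : Int))).sum)) := by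
  induction a generalizing s with
  | nil => simp
  | cons i t ih =>
    simp only [List.foldl_cons, List.map_cons, List.sum_cons]
    rw [inner_fold, ih]
    simp
    constructor <;> ring

-- B's loop accumulates the signed difference of the same two counts
lemma b_fold (a : List Int) (f g : Int → Int) (d : Int) :
    a.foldl (fun (d : Int) x => d + (f x - g x)) d
    = d + (a.map f).sum - (a.map g).sum := by
  induction a generalizing d with
  | nil => simp
  | cons x t ih =>
    simp only [List.foldl_cons, List.map_cons, List.sum_cons]
    rw [ih]
    ring

-- per-face agreement: binary search on sorted b counts the faces of b below x …
lemma bl_count (b : List Int) (x : Int) :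
    (pvBL (PySem.List.sorted b (fun y => y) false) x ((PySem.List.sorted b (fun y => y) false).length + 1) 0 (PySem.List.sorted b (fun y => y) false).length : Int)
    = (b.countP (fun j => decide (j < x)) : Int) := by
  have hs : (PySem.List.sorted b (fun y => y) false).Pairwise (· ≤ ·) :=
    PySem.List.sorted_pairwise b (fun y => y) ..
  rw [pvBL_spec _ x hs _ 0 _ (by omega) (le_refl _) (Nat.zero_le _)
      (fun j hj hjk => by omega) (fun j hj hjk => by omega)]
  rw [(PySem.List.sorted_perm b (fun y => y) false).countP_eq]

-- … and m - bisect_right counts the faces of b above x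
lemma br_count (b : List Int) (x : Int) :
    ((PySem.List.sorted b (fun y => y) false).length : Int)
      - (pvBR (PySem.List.sorted b (fun y => y) false) x ((PySem.List.sorted b (fun y => y) false).length + 1) 0 (PySem.List.sorted b (fun y => y) false).length : Int)
    = (b.countP (fun j => decide (x < j)) : Int) := by
  have hs : (PySem.List.sorted b (fun y => y) false).Pairwise (· ≤ ·) :=
    PySem.List.sorted_pairwise b (fun y => y) ..
  rw [pvBR_spec _ x hs _ 0 _ (by omega) (le_refl _) (Nat.zero_le _)
      (fun j hj hjk => by omega) (fun j hj hjk => by omega)]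
  have hlen : ∀ l : List Int, l.countP (fun y => decide (y ≤ x)) + l.countP (fun y => decide (x < y)) = l.length := by
    intro l
    induction l with
    | nil => simp
    | cons y t ih =>
      by_cases hc : y ≤ x
      · simp [hc, not_lt.mpr hc]
        omega
      · simp [hc, not_le.mp hc]
        omega
  have hlen := hlen (PySem.List.sorted b (fun y => y) false)
  have hperm := (PySem.List.sorted_perm b (fun y => y) false).countP_eq (fun j => decide (x < j))
  omega

-- ===== VERDICT (by name: the statement is the Claim_ definition above) =====
theorem is_win_first_spec : Claim_equal_is_win_first := by
  intro a b _
  unfold Spec_is_win_first is_win_first is_win_first_alt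
  simp only
  rw [a_fold]
  rw [b_fold a
    (fun x => (pvBL (PySem.List.sorted b (fun y => y) false) x ((PySem.List.sorted b (fun y => y) false).length + 1) 0 (PySem.List.sorted b (fun y => y) false).length : Int))
    (fun x => ((PySem.List.sorted b (fun y => y) false).length : Int)
      - (pvBR (PySem.List.sorted b (fun y => y) false) x ((PySem.List.sorted b (fun y => y) false).length + 1) 0 (PySem.List.sorted b (fun y => y) false).length : Int))]
  have hf : (a.map (fun x => (pvBL (PySem.List.sorted b (fun y => y) false) x ((PySem.List.sorted b (fun y => y) false).length + 1) 0 (PySem.List.sorted b (fun y => y) false).length : Int)))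
      = a.map (fun i => (b.countP (fun j => decide (j < i)) : Int)) :=
    List.map_congr_left (fun x _ => bl_count b x)
  have hg : (a.map (fun x => ((PySem.List.sorted b (fun y => y) false).length : Int)
        - (pvBR (PySem.List.sorted b (fun y => y) false) x ((PySem.List.sorted b (fun y => y) false).length + 1) 0 (PySem.List.sorted b (fun y => y) false).length : Int)))
      = a.map (fun i => (b.countP (fun j => decide (i < j)) : Int)) := by
    exact List.map_congr_left (fun x _ => br_count b x)
  rw [hf, hg]
  simp only [zero_add]
  rw [decide_eq_decide]
  omega
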